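-- pv_equiv track=rewrite | github.com/ssshhh0402/Y.C.S.T | Python/PG/Level3/PG_숫자게임.py | solution
-- ===== SOURCE A (Python) =====
-- def solution(A, B):
--     answer = 0
--     A.sort()
--     B.sort()
--     if min(A) >= max(B):
--         return answer
--     else:
--         for a in A:
--             for b in B:
--                 if a < b:
--                     answer += 1
--                     B.remove(b)
--                     break
--     return answer
-- ===== SOURCE B (Python) =====
-- def solution(A, B):
--     As = sorted(A)
--     Bs = sorted(B)
--     ans = 0
--     j = 0
--     for a in As:
--         while j < len(Bs) and Bs[j] <= a:
--             j += 1
--         if j == len(Bs):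
--             break
--         ans += 1
--         j += 1
--     return ans
-- ===== Notes on version B (the rewrite author's own statement) =====
-- stated objective: faster
-- what changed: Replaces the nested scan with list.remove over the sorted B by a single two-pointer sweep over sorted copies of A and B (no mutation of the arguments).
import Mathlib
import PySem

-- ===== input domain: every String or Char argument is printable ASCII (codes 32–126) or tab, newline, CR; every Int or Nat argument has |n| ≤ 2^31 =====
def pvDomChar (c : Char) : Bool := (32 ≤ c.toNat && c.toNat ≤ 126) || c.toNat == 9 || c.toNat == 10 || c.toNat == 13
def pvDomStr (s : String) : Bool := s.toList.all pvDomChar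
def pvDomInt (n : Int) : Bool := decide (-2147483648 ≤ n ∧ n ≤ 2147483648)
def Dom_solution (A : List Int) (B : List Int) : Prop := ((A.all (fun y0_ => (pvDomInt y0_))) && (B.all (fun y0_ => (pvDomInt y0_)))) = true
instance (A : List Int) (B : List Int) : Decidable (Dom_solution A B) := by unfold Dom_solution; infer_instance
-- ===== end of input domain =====

-- B replaces A's nested scan-and-remove over sorted B by a two-pointer sweep over sorted
-- copies of A and B. NOTE: Python A sorts A and B in place and removes elements from B
-- (caller-visible mutation); B does not mutate its arguments. The equivalence proved here
-- is about the return value only.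

-- ===== PORT A =====
-- inner loop: 'for b in B: if a < b: answer += 1; B.remove(b); break'
-- (the scanned b always occurs in B, so remove? always returns some; getD's default is never used)
def solInner (a : Int) (B : List Int) : List Int → List Int × Int
  | [] => (B, 0)
  | b :: rest => if a < b then ((PySem.List.remove? B b).getD B, 1) else solInner a B rest

-- outer loop: 'for a in A: …' carrying the mutated B and answer
def solOuter : List Int → List Int → Int → Int
  | [], _B, answer => answer
  | a :: as, B, answer =>
    let r := solInner a B B
    solOuter as r.1 (answer + r.2)

def solution (A : List Int) (B : List Int) : Int :=
  let answer : Int := 0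
  let A' := PySem.List.sorted A (fun x => x) false
  let B' := PySem.List.sorted B (fun x => x) false
  match PySem.List.min? A' (fun x => x), PySem.List.max? B' (fun x => x) with
  | some m, some M => if m ≥ M then answer else solOuter A' B' answer
  | _, _ => 0  -- min()/max() of an empty list raises in Python; excluded by Pre_solution

-- ===== PORT B =====
-- the for/while two-pointer loop of Source B as structural recursion on the same state
def twoPtr : List Int → List Int → Int
  | _, [] => 0
  | [], _ :: _ => 0
  | a :: as, b :: bs => if b ≤ a then twoPtr (a :: as) bs else 1 + twoPtr as bs

def solution_alt (A : List Int) (B : List Int) : Int :=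
  twoPtr (PySem.List.sorted A (fun x => x) false) (PySem.List.sorted B (fun x => x) false)

-- ===== PRECONDITION & SPEC =====
-- Pre_ excludes empty A or B, on which Python A raises ValueError (min()/max() of empty sequence).
def Pre_solution (A : List Int) (B : List Int) : Prop := A ≠ [] ∧ B ≠ []
instance (A : List Int) (B : List Int) : Decidable (Pre_solution A B) := by unfold Pre_solution; infer_instance
def pvWitness_solution : List Int × List Int := ([1, 3], [2, 2])

def Spec_solution (A : List Int) (B : List Int) (out : Int) : Prop := out = solution_alt A B
instance (A : List Int) (B : List Int) (out : Int) : Decidable (Spec_solution A B out) := by unfold Spec_solution; infer_instance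

-- ===== CLAIM (what is proved, stated in full; the proofs are below) =====
def Claim_equal_solution : Prop := ∀ (A : List Int) (B : List Int), Dom_solution A B → Pre_solution A B → Spec_solution A B (solution A B)

-- ===== LEMMAS AND PROOFS =====

-- the two-pointer sweep over an exhausted A is 0 whatever remains of B
lemma tp_nil : ∀ (bs : List Int), twoPtr [] bs = 0 := by
  intro bs; cases bs <;> rfl

-- A's inner scan finds nothing when every remaining b is ≤ a
lemma inner_none (a : Int) (B : List Int) :
    ∀ (rest : List Int), (∀ b ∈ rest, ¬ a < b) → solInner a B rest = (B, 0) := by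
  intro rest h
  induction rest with
  | nil => rfl
  | cons b r ih =>
    simp only [solInner, if_neg (h b (by simp))]
    exact ih (fun x hx => h x (by simp [hx]))

-- list.remove of b from p ++ b :: t removes exactly that b when b does not occur in p
lemma remove_prefix (b : Int) :
    ∀ (p t : List Int), (∀ x ∈ p, x ≠ b) → PySem.List.remove? (p ++ b :: t) b = some (p ++ t) := by
  intro p t h
  induction p with
  | nil => simp [PySem.List.remove?_cons_self]
  | cons x p' ih =>
    rw [List.cons_append, PySem.List.remove?_cons_of_ne _ (h x (by simp)),
        ih (fun y hy => h y (by simp [hy]))]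
    rfl

-- A's inner scan on B = p ++ b :: t (p already skipped elements ≤ a, b the first hit)
lemma inner_found (a b : Int) (p t : List Int) (hp : ∀ x ∈ p, ¬ a < x) (hb : a < b) :
    ∀ (p2 : List Int), (∀ x ∈ p2, ¬ a < x) →
      solInner a (p ++ b :: t) (p2 ++ b :: t) = (p ++ t, 1) := by
  intro p2 hp2
  induction p2 with
  | nil =>
    simp only [List.nil_append, solInner, if_pos hb]
    rw [remove_prefix b p t (fun x hx hxb => (hp x hx) (hxb ▸ hb))]
    rfl
  | cons x p2' ih =>
    simp only [List.cons_append, solInner, if_neg (hp2 x (by simp))]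
    exact ih (fun y hy => hp2 y (by simp [hy]))

-- the two-pointer sweep skips a prefix of elements ≤ the current a
lemma tp_skip (a : Int) (as : List Int) :
    ∀ (p r : List Int), (∀ x ∈ p, x ≤ a) → twoPtr (a :: as) (p ++ r) = twoPtr (a :: as) r := by
  intro p r h
  induction p with
  | nil => rfl
  | cons x p' ih =>
    simp only [List.cons_append, twoPtr, if_pos (h x (by simp))]
    exact ih (fun y hy => h y (by simp [hy]))

-- when no b exceeds any a, the two-pointer count is 0
lemma tp_zero : ∀ (bs as : List Int), (∀ b ∈ bs, ∀ x ∈ as, b ≤ x) → twoPtr as bs = 0 := by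
  intro bs
  induction bs with
  | nil => intro as _; cases as <;> rfl
  | cons b bs' ih =>
    intro as h
    cases as with
    | nil => rfl
    | cons a as' =>
      simp only [twoPtr, if_pos (h b (by simp) a (by simp))]
      exact ih (a :: as') (fun y hy x hx => h y (by simp [hy]) x hx)

-- head of a non-empty dropWhile fails the predicate
lemma dropWhile_head_false (q : Int → Bool) :
    ∀ (l : List Int) (b : Int) (t : List Int), l.dropWhile q = b :: t → q b = false := by
  intro l
  induction l with
  | nil => intro b t h; simp [List.dropWhile] at h
  | cons x xs ih =>
    intro b t h
    by_cases hx : q x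
    · exact ih b t (by simpa [List.dropWhile, hx] using h)
    · simp [List.dropWhile, hx] at h
      simp [← h.1, Bool.not_eq_true] at hx ⊢
      exact hx

-- main invariant: on sorted inputs, A's outer loop computes the two-pointer count
lemma outer_eq_twoPtr :
    ∀ (as bs : List Int) (ans : Int), as.Pairwise (· ≤ ·) → bs.Pairwise (· ≤ ·) →
      solOuter as bs ans = ans + twoPtr as bs := by
  intro as
  induction as with
  | nil => intro bs ans _ _; simp [solOuter, tp_nil]
  | cons a as' ih =>
    intro bs ans hA hB
    have ha : ∀ x ∈ as', a ≤ x := (List.pairwise_cons.mp hA).1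
    have hA' : as'.Pairwise (· ≤ ·) := (List.pairwise_cons.mp hA).2
    by_cases hex : ∃ b ∈ bs, a < b
    · -- first b > a found; bs = p ++ b :: t with p the skipped prefix
      set q : Int → Bool := fun x => decide (x ≤ a) with hq
      have hsplit : bs.takeWhile q ++ bs.dropWhile q = bs := List.takeWhile_append_dropWhile
      have hd : bs.dropWhile q ≠ [] := by
        intro hnil
        obtain ⟨b, hbmem, hab⟩ := hex
        have : b ∈ bs.takeWhile q := by
          rw [← hsplit, List.mem_append] at hbmem
          rcases hbmem with h1 | h1
          · exact h1
          · rw [hnil] at h1; exact absurd h1 (List.not_mem_nil)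
        have := List.mem_takeWhile_imp this
        simp [hq] at this
        omega
      obtain ⟨b, t, hbt⟩ := List.exists_cons_of_ne_nil hd
      set p := bs.takeWhile q with hpdef
      have hbs : bs = p ++ b :: t := by rw [hpdef, ← hbt]; exact hsplit.symm
      have hp : ∀ x ∈ p, x ≤ a := by
        intro x hx
        have := List.mem_takeWhile_imp hx
        simpa [hq] using this
      have hb : a < b := by
        have := dropWhile_head_false q bs b t hbt
        simp [hq] at this
        omega
      have hpt : (p ++ t).Pairwise (· ≤ ·) := by
        refine List.Pairwise.sublist ?_ (hbs ▸ hB)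
        exact (List.sublist_cons_self b t).append_left p
      -- A's side
      have hinner : solInner a bs bs = (p ++ t, 1) := by
        rw [hbs]
        exact inner_found a b p t (fun x hx => by have := hp x hx; omega) hb p
          (fun x hx => by have := hp x hx; omega)
      have hAside : solOuter (a :: as') bs ans = solOuter as' (p ++ t) (ans + 1) := by
        simp [solOuter, hinner]
      -- B's side
      have hBside : twoPtr (a :: as') bs = 1 + twoPtr as' t := by
        rw [hbs, tp_skip a as' p (b :: t) hp]
        simp [twoPtr, if_neg (by omega : ¬ b ≤ a)]
      have hdropp : twoPtr as' (p ++ t) = twoPtr as' t := by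
        cases as' with
        | nil => rw [tp_nil, tp_nil]
        | cons a' as'' =>
          exact tp_skip a' as'' p t (fun x hx => le_trans (hp x hx) (ha a' (by simp)))
      rw [hAside, ih (p ++ t) (ans + 1) hA' hpt, hBside, hdropp]
      ring
    · -- every b ≤ a: nothing found now or ever again
      push Not at hex
      have hle : ∀ b ∈ bs, b ≤ a := fun b hb => by have := hex b hb; omega
      have hAside : solOuter (a :: as') bs ans = solOuter as' bs (ans + 0) := by
        simp [solOuter, inner_none a bs bs (fun b hb => by have := hle b hb; omega)]
      rw [hAside, ih bs (ans + 0) hA' hB]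
      have h1 : twoPtr as' bs = 0 :=
        tp_zero bs as' (fun b hb x hx => le_trans (hle b hb) (ha x hx))
      have h2 : twoPtr (a :: as') bs = 0 :=
        tp_zero bs (a :: as') (fun b hb x hx => by
          rcases List.mem_cons.mp hx with h | h
          · exact h ▸ hle b hb
          · exact le_trans (hle b hb) (ha x h))
      rw [h1, h2]; ring

-- ===== VERDICT (by name: the statement is the Claim_ definition above) =====
theorem solution_spec : Claim_equal_solution := by
  intro A B _dom hpre
  unfold Spec_solution solution solution_alt
  set As := PySem.List.sorted A (fun x => x) false with hAs
  set Bs := PySem.List.sorted B (fun x => x) false with hBs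
  have hAne : As ≠ [] := by
    rw [hAs]; intro h; exact hpre.1 ((PySem.List.sorted_eq_nil_iff _ _ _).mp h)
  have hBne : Bs ≠ [] := by
    rw [hBs]; intro h; exact hpre.2 ((PySem.List.sorted_eq_nil_iff _ _ _).mp h)
  have hApw : As.Pairwise (· ≤ ·) := by
    have := PySem.List.sorted_pairwise A (fun x => x)
    simpa [hAs] using this
  have hBpw : Bs.Pairwise (· ≤ ·) := by
    have := PySem.List.sorted_pairwise B (fun x => x)
    simpa [hBs] using this
  cases hm : PySem.List.min? As (fun x => x) with
  | none => exact absurd ((PySem.List.min?_eq_none_iff _ _).mp hm) hAne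
  | some m =>
    cases hM : PySem.List.max? Bs (fun x => x) with
    | none => exact absurd ((PySem.List.max?_eq_none_iff _ _).mp hM) hBne
    | some M =>
      simp only [hm, hM]
      split_ifs with hge
      · -- every b ≤ M ≤ m ≤ every a: count is 0
        symm
        refine tp_zero Bs As (fun b hb x hx => ?_)
        have h1 : b ≤ M := PySem.List.max?_isMax hM b hb
        have h2 : m ≤ x := PySem.List.min?_isMin hm x hx
        omega
      · have := outer_eq_twoPtr As Bs 0 hApw hBpw
        omega
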